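-- pv_equiv track=rewrite | github.com/calisweetleaf/recursive-categorical-framework | URSMIF_Full/ursmif-theory.py | eventually_resolved
-- ===== SOURCE A (Python) =====
-- from typing import Any, Dict, List, Tuple, Callable, Optional, Set, Union
--
-- def eventually_resolved(loop_states: List[bool]) -> bool:
--     """
--     Check ◇¬loop_present (eventually no loop).
--     Returns True if loop is eventually resolved.
--     """
--     # Find first loop detection
--     loop_start = None
--     for i, is_loop in enumerate(loop_states):
--         if is_loop:
--             loop_start = i
--             break
--
--     if loop_start is None:
--         return True  # No loop detected, trivially satisfied
--
--     # Check if loop is eventually resolved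
--     for is_loop in loop_states[loop_start:]:
--         if not is_loop:
--             return True  # Found a state without loop
--
--     return False  # Loop never resolved
-- ===== SOURCE B (Python) =====
-- def eventually_resolved(loop_states):
--     """Single linear pass: flag when a loop state is seen; resolved as soon as
--     a non-loop state follows; otherwise resolved iff no loop was ever seen."""
--     seen_loop = False
--     for is_loop in loop_states:
--         if is_loop:
--             seen_loop = True
--         elif seen_loop:
--             return True
--     return not seen_loop
-- ===== Notes on version B (the rewrite author's own statement) =====
-- stated objective: simpler
-- what changed: Replaced A's two sequential scans (find the index of the first loop state, then rescan the slice from that index) by one linear pass carrying a seen_loop flag that returns True as soon as a non-loop state follows a loop state.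
import Mathlib
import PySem

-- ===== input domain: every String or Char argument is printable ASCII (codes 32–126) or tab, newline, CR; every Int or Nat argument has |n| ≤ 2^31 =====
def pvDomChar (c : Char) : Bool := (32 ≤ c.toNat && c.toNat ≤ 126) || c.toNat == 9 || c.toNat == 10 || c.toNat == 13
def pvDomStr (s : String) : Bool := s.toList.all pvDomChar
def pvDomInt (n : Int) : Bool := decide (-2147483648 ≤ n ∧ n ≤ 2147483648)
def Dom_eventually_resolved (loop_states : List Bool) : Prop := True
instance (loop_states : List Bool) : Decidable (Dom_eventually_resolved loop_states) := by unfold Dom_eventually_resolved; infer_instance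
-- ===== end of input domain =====

-- B replaces A's find-first-index-then-rescan-the-slice by one pass with a seen_loop flag (simpler; same O(n) cost).

-- ===== PORT A =====
-- first for-loop: enumerate, break at the first True, i carried explicitly
def findLoopStart : List Bool → Nat → Option Nat
  | [], _ => none
  | b :: r, i => if b then some i else findLoopStart r (i + 1)

-- second for-loop over loop_states[loop_start:]
def scanResolved : List Bool → Bool
  | [] => false
  | b :: r => if !b then true else scanResolved r

def eventually_resolved (loop_states : List Bool) : Bool :=
  match findLoopStart loop_states 0 with
  | none => true
  | some i => scanResolved (loop_states.drop i)  -- loop_states[i:] with 0 ≤ i: exact as List.drop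

-- ===== PORT B =====
def altGo (seen : Bool) : List Bool → Bool
  | [] => !seen
  | b :: r => if b then altGo true r else if seen then true else altGo seen r

def eventually_resolved_alt (loop_states : List Bool) : Bool :=
  altGo false loop_states

-- ===== PRECONDITION & SPEC =====
def Spec_eventually_resolved (loop_states : List Bool) (out : Bool) : Prop := out = eventually_resolved_alt loop_states
instance (loop_states : List Bool) (out : Bool) : Decidable (Spec_eventually_resolved loop_states out) := by unfold Spec_eventually_resolved; infer_instance

-- ===== CLAIM (what is proved, stated in full; the proofs are below) =====
def Claim_equal_eventually_resolved : Prop := ∀ (loop_states : List Bool), Dom_eventually_resolved loop_states → Spec_eventually_resolved loop_states (eventually_resolved loop_states)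

-- ===== LEMMAS AND PROOFS =====
theorem altGo_true_eq_scanResolved (r : List Bool) : altGo true r = scanResolved r := by
  induction r with
  | nil => rfl
  | cons b r ih => cases b <;> simp [altGo, scanResolved, ih]

theorem findLoopStart_shift (r : List Bool) (k : Nat) :
    findLoopStart r k = (findLoopStart r 0).map (· + k) := by
  induction r generalizing k with
  | nil => rfl
  | cons b r ih =>
    cases b with
    | true => simp [findLoopStart]
    | false =>
      simp only [findLoopStart, Bool.false_eq_true, if_false]
      rw [ih (k + 1), ih 1]
      cases findLoopStart r 0 <;> simp <;> omega

theorem main_eq (xs : List Bool) : eventually_resolved xs = altGo false xs := by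
  induction xs with
  | nil => rfl
  | cons b r ih =>
    cases b with
    | true =>
      simp [eventually_resolved, findLoopStart, altGo, altGo_true_eq_scanResolved,
        scanResolved]
    | false =>
      simp only [altGo, Bool.false_eq_true, if_false]
      rw [← ih]
      simp only [eventually_resolved, findLoopStart, Bool.false_eq_true, if_false,
        findLoopStart_shift r 1]
      cases h : findLoopStart r 0 with
      | none => simp
      | some i => simp [List.drop_succ_cons]

-- ===== VERDICT (by name: the statement is the Claim_ definition above) =====
theorem eventually_resolved_spec : Claim_equal_eventually_resolved := by
  intro xs _
  unfold Spec_eventually_resolved eventually_resolved_alt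
  exact main_eq xs
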